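-- pv_equiv track=rewrite | github.com/danijel3/TransformersSpeechAligner | large/get_match.py | char_to_word_idx
-- ===== SOURCE A (Python) =====
-- def char_to_word_idx(text: str, char_pos: int) -> int:
--     """
--     Converts character position to word position.
--     :param text: input text
--     :param char_pos: character position
--     :return: word position
--     """
--     words = text.split()
--     pos = 0
--     for i, w in enumerate(words):
--         if pos + len(w) > char_pos:
--             return i
--         pos += len(w) + 1
--     return len(words) - 1
-- ===== SOURCE B (Python) =====
-- def char_to_word_idx(text: str, char_pos: int) -> int:
--     """B: build the table of word end offsets once, then binary-search it;
--     clamp with min so past-the-end positions map to the last word (-1 if no words)."""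
--     words = text.split()
--     ends = []
--     pos = 0
--     for w in words:
--         ends.append(pos + len(w))
--         pos += len(w) + 1
--     lo, hi = 0, len(ends)
--     while lo < hi:
--         mid = (lo + hi) // 2
--         if ends[mid] <= char_pos:
--             lo = mid + 1
--         else:
--             hi = mid
--     return min(lo, len(words) - 1)
-- ===== Notes on version B (the rewrite author's own statement) =====
-- stated objective: alternative
-- what changed: Replaces the incremental threshold loop by an end-offset table built once plus a hand-written bisect_right binary search, clamped with min to reproduce the past-end/empty behaviour.
import Mathlib
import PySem

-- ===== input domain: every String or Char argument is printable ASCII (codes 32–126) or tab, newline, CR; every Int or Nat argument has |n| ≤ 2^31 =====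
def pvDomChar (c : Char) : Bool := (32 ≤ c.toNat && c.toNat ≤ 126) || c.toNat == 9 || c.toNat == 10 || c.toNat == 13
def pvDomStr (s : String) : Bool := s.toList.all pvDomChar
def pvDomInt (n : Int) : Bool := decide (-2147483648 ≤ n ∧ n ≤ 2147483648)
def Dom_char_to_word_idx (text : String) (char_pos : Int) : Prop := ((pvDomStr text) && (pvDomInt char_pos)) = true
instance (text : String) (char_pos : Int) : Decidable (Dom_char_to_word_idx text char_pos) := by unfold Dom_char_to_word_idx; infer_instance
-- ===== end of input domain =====

-- B replaces A's incremental threshold loop by an end-offset table plus binary search (same cost class; alternative decomposition).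


-- ===== PORT A =====
-- A's for-loop with early return: pos/i accumulators, Option for the early return.
def cwiGo (char_pos : Int) : List (List Char) → Int → Int → Option Int
  | [], _, _ => none
  | w :: ws, pos, i =>
      if pos + (w.length : Int) > char_pos then some i
      else cwiGo char_pos ws (pos + w.length + 1) (i + 1)

def char_to_word_idx (text : String) (char_pos : Int) : Int :=
  let words := PySem.Chars.split₀ text.toList
  (cwiGo char_pos words 0 0).getD ((words.length : Int) - 1)

-- ===== PORT B =====
-- B: table of word end offsets, then a hand-written bisect_right, clamped with min.
def cwiEnds : List (List Char) → Int → List Int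
  | [], _ => []
  | w :: ws, pos => (pos + (w.length : Int)) :: cwiEnds ws (pos + w.length + 1)

def cwiBisect (a : List Int) (x : Int) (lo hi : Nat) : Nat :=
  if _h : lo < hi then
    let mid := (lo + hi) / 2
    if a.getD mid 0 ≤ x then cwiBisect a x (mid + 1) hi else cwiBisect a x lo mid
  else lo
termination_by hi - lo
decreasing_by all_goals omega

def char_to_word_idx_alt (text : String) (char_pos : Int) : Int :=
  let words := PySem.Chars.split₀ text.toList
  let ends := cwiEnds words 0
  min ((cwiBisect ends char_pos 0 ends.length : Nat) : Int) ((words.length : Int) - 1)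

-- ===== PRECONDITION & SPEC =====
def Spec_char_to_word_idx (text : String) (char_pos : Int) (out : Int) : Prop := out = char_to_word_idx_alt text char_pos
instance (text : String) (char_pos : Int) (out : Int) : Decidable (Spec_char_to_word_idx text char_pos out) := by unfold Spec_char_to_word_idx; infer_instance

-- ===== CLAIM (what is proved, stated in full; the proofs are below) =====
def Claim_equal_char_to_word_idx : Prop := ∀ (text : String) (char_pos : Int), Dom_char_to_word_idx text char_pos → Spec_char_to_word_idx text char_pos (char_to_word_idx text char_pos)

-- ===== LEMMAS AND PROOFS =====

-- number of leading word-ends ≤ char_pos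
def cwiT (char_pos : Int) (ws : List (List Char)) (pos : Int) : Nat :=
  ((cwiEnds ws pos).takeWhile (fun e => decide (e ≤ char_pos))).length

theorem takeWhile_len_le (p : Int → Bool) (l : List Int) : (l.takeWhile p).length ≤ l.length := by
  induction l with
  | nil => simp
  | cons a l ih =>
      by_cases h : p a
      · simp [List.takeWhile, h]
        omega
      · simp [List.takeWhile, h]

theorem cwiEnds_length (ws : List (List Char)) (pos : Int) : (cwiEnds ws pos).length = ws.length := by
  induction ws generalizing pos with
  | nil => rfl
  | cons w ws ih => simp [cwiEnds, ih]

theorem cwiT_le (char_pos : Int) (ws : List (List Char)) (pos : Int) :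
    cwiT char_pos ws pos ≤ ws.length := by
  have := takeWhile_len_le (fun e => decide (e ≤ char_pos)) (cwiEnds ws pos)
  simpa [cwiT, cwiEnds_length] using this

theorem cwiT_cons_le (char_pos : Int) (w : List Char) (ws : List (List Char)) (pos : Int)
    (h : pos + (w.length : Int) ≤ char_pos) :
    cwiT char_pos (w :: ws) pos = cwiT char_pos ws (pos + w.length + 1) + 1 := by
  simp [cwiT, cwiEnds, h]

theorem cwiT_cons_gt (char_pos : Int) (w : List Char) (ws : List (List Char)) (pos : Int)
    (h : ¬ pos + (w.length : Int) ≤ char_pos) :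
    cwiT char_pos (w :: ws) pos = 0 := by
  simp [cwiT, cwiEnds, h]

theorem cwiGo_eq (char_pos : Int) (ws : List (List Char)) (pos i : Int) :
    cwiGo char_pos ws pos i =
      if cwiT char_pos ws pos < ws.length then some (i + cwiT char_pos ws pos) else none := by
  induction ws generalizing pos i with
  | nil => simp [cwiGo, cwiT, cwiEnds]
  | cons w ws ih =>
      by_cases h : pos + (w.length : Int) ≤ char_pos
      · have hgo : cwiGo char_pos (w :: ws) pos i
            = cwiGo char_pos ws (pos + w.length + 1) (i + 1) := by
          simp only [cwiGo, if_neg (by omega : ¬ pos + (w.length : Int) > char_pos)]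
        rw [hgo, ih, cwiT_cons_le char_pos w ws pos h]
        simp only [List.length_cons]
        by_cases hlt : cwiT char_pos ws (pos + w.length + 1) < ws.length
        · rw [if_pos hlt, if_pos (by omega)]
          congr 1
          omega
        · rw [if_neg hlt, if_neg (by omega)]
      · rw [cwiT_cons_gt char_pos w ws pos h]
        simp only [cwiGo, if_pos (by omega : pos + (w.length : Int) > char_pos)]
        simp

-- every entry of the end table is ≥ the starting offset
theorem cwiEnds_lower (ws : List (List Char)) (pos : Int) :
    ∀ e ∈ cwiEnds ws pos, pos ≤ e := by
  induction ws generalizing pos with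
  | nil => simp [cwiEnds]
  | cons w ws ih =>
      intro e he
      simp only [cwiEnds, List.mem_cons] at he
      rcases he with h | h
      · omega
      · have := ih (pos + w.length + 1) e h
        omega

-- entries inside the takeWhile prefix are ≤ char_pos
theorem cwiEnds_le (char_pos : Int) (ws : List (List Char)) (pos : Int) :
    ∀ j, j < cwiT char_pos ws pos → (cwiEnds ws pos).getD j 0 ≤ char_pos := by
  induction ws generalizing pos with
  | nil => simp [cwiT, cwiEnds]
  | cons w ws ih =>
      intro j hj
      by_cases h : pos + (w.length : Int) ≤ char_pos
      · rw [cwiT_cons_le char_pos w ws pos h] at hj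
        cases j with
        | zero => simpa [cwiEnds] using h
        | succ j' =>
            have := ih (pos + w.length + 1) j' (by omega)
            simpa [cwiEnds] using this
      · rw [cwiT_cons_gt char_pos w ws pos h] at hj
        omega

-- entries past the takeWhile prefix are > char_pos (uses that the table is increasing)
theorem cwiEnds_gt (char_pos : Int) (ws : List (List Char)) (pos : Int) :
    ∀ j, cwiT char_pos ws pos ≤ j → j < (cwiEnds ws pos).length →
      char_pos < (cwiEnds ws pos).getD j 0 := by
  induction ws generalizing pos with
  | nil => simp [cwiEnds]
  | cons w ws ih =>
      intro j hTj hjlen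
      by_cases h : pos + (w.length : Int) ≤ char_pos
      · rw [cwiT_cons_le char_pos w ws pos h] at hTj
        cases j with
        | zero => omega
        | succ j' =>
            have hlen' : j' < (cwiEnds ws (pos + w.length + 1)).length := by
              simp only [cwiEnds, List.length_cons] at hjlen
              omega
            have := ih (pos + w.length + 1) j' (by omega) hlen'
            simpa [cwiEnds] using this
      · cases j with
        | zero =>
            simp only [cwiEnds, List.getD_cons_zero]
            omega
        | succ j' =>
            have hlen' : j' < (cwiEnds ws (pos + w.length + 1)).length := by
              simp only [cwiEnds, List.length_cons] at hjlen
              omega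
            have hmem : (cwiEnds ws (pos + w.length + 1)).getD j' 0 ∈
                cwiEnds ws (pos + w.length + 1) := by
              rw [List.getD_eq_getElem _ _ hlen']
              exact List.getElem_mem hlen'
            have hlow := cwiEnds_lower ws (pos + w.length + 1) _ hmem
            simp only [cwiEnds, List.getD_cons_succ]
            omega

-- binary-search correctness against the split point t
theorem cwiBisect_eq (a : List Int) (x : Int) (t : Nat)
    (H1 : ∀ j, j < t → a.getD j 0 ≤ x)
    (H2 : ∀ j, t ≤ j → j < a.length → x < a.getD j 0) :
    ∀ n lo hi, hi - lo ≤ n → lo ≤ t → t ≤ hi → hi ≤ a.length → cwiBisect a x lo hi = t := by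
  intro n
  induction n with
  | zero =>
      intro lo hi hfuel h1 h2 h3
      rw [cwiBisect]
      simp only [dif_neg (by omega : ¬ lo < hi)]
      omega
  | succ n ih =>
      intro lo hi hfuel h1 h2 h3
      by_cases hlh : lo < hi
      · rw [cwiBisect]
        simp only [dif_pos hlh]
        by_cases hcmp : a.getD ((lo + hi) / 2) 0 ≤ x
        · have hmt : (lo + hi) / 2 < t := by
            by_contra hc
            exact absurd hcmp (not_le.mpr (H2 _ (by omega) (by omega)))
          simp only [if_pos hcmp]
          exact ih ((lo + hi) / 2 + 1) hi (by omega) (by omega) h2 h3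
        · have htm : t ≤ (lo + hi) / 2 := by
            by_contra hc
            exact hcmp (H1 _ (by omega))
          simp only [if_neg hcmp]
          exact ih lo ((lo + hi) / 2) (by omega) h1 htm (by omega)
      · rw [cwiBisect]
        simp only [dif_neg hlh]
        omega

-- the two characterizations agree
theorem cwi_main (ws : List (List Char)) (char_pos : Int) :
    (cwiGo char_pos ws 0 0).getD ((ws.length : Int) - 1)
      = min ((cwiBisect (cwiEnds ws 0) char_pos 0 (cwiEnds ws 0).length : Nat) : Int)
          ((ws.length : Int) - 1) := by
  have hlen : (cwiEnds ws 0).length = ws.length := cwiEnds_length ws 0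
  have htle : cwiT char_pos ws 0 ≤ ws.length := cwiT_le char_pos ws 0
  have hb : cwiBisect (cwiEnds ws 0) char_pos 0 (cwiEnds ws 0).length = cwiT char_pos ws 0 :=
    cwiBisect_eq (cwiEnds ws 0) char_pos (cwiT char_pos ws 0)
      (cwiEnds_le char_pos ws 0)
      (cwiEnds_gt char_pos ws 0)
      (cwiEnds ws 0).length 0 (cwiEnds ws 0).length (by omega) (by omega)
      (by omega) (by omega)
  rw [cwiGo_eq, hb]
  by_cases hlt : cwiT char_pos ws 0 < ws.length
  · simp only [if_pos hlt, Option.getD_some]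
    rw [min_def]
    split_ifs with hmin
    · simp
    · omega
  · simp only [if_neg hlt, Option.getD_none]
    rw [min_def]
    split_ifs with hmin <;> omega

-- ===== VERDICT (by name: the statement is the Claim_ definition above) =====
theorem char_to_word_idx_spec : Claim_equal_char_to_word_idx := by
  intro text char_pos _
  exact cwi_main (PySem.Chars.split₀ text.toList) char_pos
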